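-- pv_equiv track=rewrite | github.com/lcm-eval/lcm-eval | src/evaluation/create_evaluation_workloads.py | add_join_order_brackets
-- ===== SOURCE A (Python) =====
-- def add_join_order_brackets(tables):
--     if len(tables) == 1:
--         return [tables[0]]
--     elif len(tables) == 2:
--         return [f"({tables[0]} {tables[1]})"]
--     else:
--         results = []
--         for i in range(1, len(tables)):
--             left_results = add_join_order_brackets(tables[:i])
--             right_results = add_join_order_brackets(tables[i:])
--             for left in left_results:
--                 for right in right_results:
--                     results.append(f"({left} {right})")
--         return results
-- ===== SOURCE B (Python) =====
-- def add_join_order_brackets(tables):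
--     n = len(tables)
--     if n == 0:
--         return []
--     dp = {}
--     for i in range(n):
--         dp[(i, i + 1)] = [tables[i]]
--     for length in range(2, n + 1):
--         for i in range(n - length + 1):
--             j = i + length
--             cell = []
--             for k in range(i + 1, j):
--                 for left in dp[(i, k)]:
--                     for right in dp[(k, j)]:
--                         cell.append(f"({left} {right})")
--             dp[(i, j)] = cell
--     return dp[(0, n)]
-- ===== Notes on version B (the rewrite author's own statement) =====
-- stated objective: alternative
-- what changed: Replaces A's top-down recursion over list slices (recomputing each sub-slice's bracketings exponentially often) by a bottom-up dynamic-programming table dp[(i,j)] filled by increasing span length, preserving the exact split order and string format.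
import Mathlib
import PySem

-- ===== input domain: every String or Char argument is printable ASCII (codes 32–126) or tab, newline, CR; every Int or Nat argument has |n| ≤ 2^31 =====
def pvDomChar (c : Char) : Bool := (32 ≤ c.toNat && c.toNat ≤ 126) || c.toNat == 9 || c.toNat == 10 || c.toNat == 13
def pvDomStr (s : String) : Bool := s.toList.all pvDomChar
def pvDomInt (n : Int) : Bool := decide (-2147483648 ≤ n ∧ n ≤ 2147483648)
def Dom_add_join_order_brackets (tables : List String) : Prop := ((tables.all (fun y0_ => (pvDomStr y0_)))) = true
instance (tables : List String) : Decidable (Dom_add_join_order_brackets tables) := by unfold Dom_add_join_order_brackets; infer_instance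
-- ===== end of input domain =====

-- B replaces A's top-down recursion over list slices by a bottom-up dynamic-programming
-- table over (start, end) index pairs, filled by increasing span length (objective: alternative).

-- ===== PORT A =====
-- literal transliteration of A's recursion: slices tables[:i] / tables[i:], ascending split i
def add_join_order_brackets (tables : List String) : List String :=
  if tables.length = 1 then
    [tables.getD 0 ""]
  else if tables.length = 2 then
    ["(" ++ tables.getD 0 "" ++ " " ++ tables.getD 1 "" ++ ")"]
  else
    (List.range' 1 (tables.length - 1)).attach.foldl
      (fun results i =>
        let left_results := add_join_order_brackets (tables.take i.1)
        let right_results := add_join_order_brackets (tables.drop i.1)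
        left_results.foldl (fun rs left =>
          right_results.foldl (fun rs right =>
            rs ++ ["(" ++ left ++ " " ++ right ++ ")"]) rs) results) []
termination_by tables.length
decreasing_by
  all_goals
    have h := List.mem_range'_1.mp i.2
    simp [List.length_take, List.length_drop]
    omega

-- ===== PORT B =====
-- literal transliteration of Source B: dp[(i,j)] = bracketings of tables[i:j], filled bottom-up
def add_join_order_brackets_alt (tables : List String) : List String :=
  let n := tables.length
  if n = 0 then []
  else
    let dp : PySem.Dict (Nat × Nat) (List String) :=
      (List.range n).foldl (fun dp i => dp.insert (i, i + 1) [tables.getD i ""]) PySem.Dict.empty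
    let dp :=
      (List.range' 2 (n - 1)).foldl (fun dp len =>
        (List.range (n - len + 1)).foldl (fun dp i =>
          let j := i + len
          let cell :=
            (List.range' (i + 1) (j - (i + 1))).foldl (fun cell k =>
              (dp.getD (i, k) []).foldl (fun cell left =>
                (dp.getD (k, j) []).foldl (fun cell right =>
                  cell ++ ["(" ++ left ++ " " ++ right ++ ")"]) cell) cell) []
          dp.insert (i, j) cell) dp) dp
    dp.getD (0, n) []

-- ===== PRECONDITION & SPEC =====
def Spec_add_join_order_brackets (tables : List String) (out : List String) : Prop := out = add_join_order_brackets_alt tables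
instance (tables : List String) (out : List String) : Decidable (Spec_add_join_order_brackets tables out) := by unfold Spec_add_join_order_brackets; infer_instance

-- ===== CLAIM (what is proved, stated in full; the proofs are below) =====
def Claim_equal_add_join_order_brackets : Prop := ∀ (tables : List String), Dom_add_join_order_brackets tables → Spec_add_join_order_brackets tables (add_join_order_brackets tables)

-- ===== LEMMAS AND PROOFS =====

/-- the combination `[f"({l} {r})" for l in ls for r in rs]` both programs build -/
def pvComb (ls rs : List String) : List String :=
  ls.flatMap (fun l => rs.map (fun r => "(" ++ l ++ " " ++ r ++ ")"))

theorem pvFoldl2 (ls rs acc : List String) :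
    ls.foldl (fun a l => rs.foldl (fun a r => a ++ ["(" ++ l ++ " " ++ r ++ ")"]) a) acc
      = acc ++ pvComb ls rs := by
  simp only [PySem.List.foldl_append_singleton_eq_map, PySem.List.foldl_append_eq_flatMap]
  rfl

theorem pvFoldlOuter (ks : List Nat) (f g : Nat → List String) (acc : List String) :
    ks.foldl (fun res k =>
        (f k).foldl (fun a l => (g k).foldl (fun a r => a ++ ["(" ++ l ++ " " ++ r ++ ")"]) a) res) acc
      = acc ++ (ks.map (fun k => pvComb (f k) (g k))).flatten := by
  simp only [pvFoldl2]
  rw [PySem.List.foldl_append_eq_flatMap, List.flatten_eq_flatMap, List.flatMap_map]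
  rfl

theorem A_one (t : List String) (h : t.length = 1) : add_join_order_brackets t = t := by
  match t, h with
  | [a], _ => rw [add_join_order_brackets]; rfl

theorem A_two (a b : String) :
    add_join_order_brackets [a, b] = ["(" ++ a ++ " " ++ b ++ ")"] := by
  rw [add_join_order_brackets]; rfl

theorem A_succ (t : List String) (h : 2 ≤ t.length) :
    add_join_order_brackets t
      = ((List.range' 1 (t.length - 1)).map (fun k =>
          pvComb (add_join_order_brackets (t.take k)) (add_join_order_brackets (t.drop k)))).flatten := by
  rcases Nat.lt_or_ge t.length 3 with h3 | h3
  · have h2 : t.length = 2 := by omega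
    match t, h2 with
    | [a, b], _ =>
        rw [A_two]
        simp [pvComb, A_one]
  · rw [add_join_order_brackets]
    rw [if_neg (by omega), if_neg (by omega)]
    rw [List.foldl_attach (l := List.range' 1 (t.length - 1))
      (f := fun results k =>
        (add_join_order_brackets (t.take k)).foldl (fun rs left =>
          (add_join_order_brackets (t.drop k)).foldl (fun rs right =>
            rs ++ ["(" ++ left ++ " " ++ right ++ ")"]) rs) results)]
    exact pvFoldlOuter _ _ _ []

-- B-side synonyms for the pieces of add_join_order_brackets_alt (each is definitionally the port's code)
def pvBase (tables : List String) : PySem.Dict (Nat × Nat) (List String) :=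
  (List.range tables.length).foldl (fun dp i => dp.insert (i, i + 1) [tables.getD i ""]) PySem.Dict.empty

def pvCell (dp : PySem.Dict (Nat × Nat) (List String)) (i j : Nat) : List String :=
  (List.range' (i + 1) (j - (i + 1))).foldl (fun cell k =>
    (dp.getD (i, k) []).foldl (fun cell left =>
      (dp.getD (k, j) []).foldl (fun cell right =>
        cell ++ ["(" ++ left ++ " " ++ right ++ ")"]) cell) cell) []

def pvInner (tables : List String) (dp : PySem.Dict (Nat × Nat) (List String)) (len : Nat) :
    PySem.Dict (Nat × Nat) (List String) :=
  (List.range (tables.length - len + 1)).foldl (fun dp i => dp.insert (i, i + len) (pvCell dp i (i + len))) dp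

theorem alt_eq (t : List String) :
    add_join_order_brackets_alt t
      = if t.length = 0 then [] else
          ((List.range' 2 (t.length - 1)).foldl (pvInner t) (pvBase t)).getD (0, t.length) [] := rfl

/-- the segment tables[i:j] -/
def pvSeg (t : List String) (i j : Nat) : List String := (t.drop i).take (j - i)

/-- invariant: dp holds A's answer for every segment of span at most L -/
def pvInv (t : List String) (L : Nat) (dp : PySem.Dict (Nat × Nat) (List String)) : Prop :=
  ∀ i j : Nat, i < j → j ≤ t.length → j - i ≤ L →
    dp.getD (i, j) [] = add_join_order_brackets (pvSeg t i j)

theorem seg_len (t : List String) (i j : Nat) (_hij : i ≤ j) (hj : j ≤ t.length) :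
    (pvSeg t i j).length = j - i := by
  simp [pvSeg]
  omega

theorem seg_one (t : List String) (i : Nat) (hi : i < t.length) :
    pvSeg t i (i + 1) = [t.getD i ""] := by
  have : (pvSeg t i (i+1)).length = 1 := by
    have h := seg_len t i (i+1) (by omega) (by omega)
    rw [show i + 1 - i = 1 by omega] at h
    exact h
  rcases List.length_eq_one_iff.mp this with ⟨a, ha⟩
  rw [ha]
  have : a = t.getD i "" := by
    have h0 : (pvSeg t i (i+1)).getD 0 "" = a := by rw [ha]; rfl
    rw [← h0]
    simp [pvSeg, List.getD_eq_getElem?_getD, List.getElem?_drop]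
  rw [this]

theorem base_inv (t : List String) : pvInv t 1 (pvBase t) := by
  intro i j hij hj hL
  have hj' : j = i + 1 := by omega
  subst hj'
  have hi : i < t.length := by omega
  rw [seg_one t i hi, A_one _ (by simp)]
  -- compute the base fold's lookup
  have : ∀ (m : Nat) (d : PySem.Dict (Nat × Nat) (List String)),
      ((List.range m).foldl (fun dp i => dp.insert (i, i + 1) [t.getD i ""]) d).getD (i, i+1) []
        = if i < m then [t.getD i ""] else d.getD (i, i+1) [] := by
    intro m
    induction m with
    | zero => intro d; simp
    | succ m ih =>
        intro d
        rw [List.range_succ, List.foldl_append]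
        simp only [List.foldl_cons, List.foldl_nil]
        rw [PySem.Dict.getD_insert]
        by_cases hm : i = m
        · simp [hm]
        · rw [if_neg (by simp [hm]), ih]
          by_cases h1 : i < m
          · rw [if_pos h1, if_pos (by omega)]
          · rw [if_neg h1, if_neg (by omega)]
  rw [pvBase, this t.length PySem.Dict.empty, if_pos hi]

theorem seg_take (t : List String) (i j k : Nat) (hk : k ≤ j - i) :
    (pvSeg t i j).take k = pvSeg t i (i + k) := by
  simp [pvSeg, List.take_take]
  omega

theorem seg_drop (t : List String) (i j k : Nat) :
    (pvSeg t i j).drop k = pvSeg t (i + k) j := by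
  simp [pvSeg, List.drop_take, List.drop_drop]
  congr 1
  omega

theorem cell_eq (t : List String) (L : Nat) (dp : PySem.Dict (Nat × Nat) (List String))
    (hinv : pvInv t L dp) (i j : Nat) (hij : i < j) (hj : j ≤ t.length) (hspan : j - i = L + 1)
    (hL : 1 ≤ L) :
    pvCell dp i j = add_join_order_brackets (pvSeg t i j) := by
  have hlen : (pvSeg t i j).length = j - i := seg_len t i j (by omega) hj
  rw [A_succ _ (by omega)]
  rw [pvCell, pvFoldlOuter]
  rw [List.nil_append, hlen]
  have hrange : List.range' (i + 1) (j - (i + 1)) = (List.range' 1 (j - i - 1)).map (fun k => i + k) := by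
    rw [List.range'_eq_map_range, List.range'_eq_map_range]
    rw [List.map_map]
    apply List.map_congr_left
    intro x hx
    simp at hx ⊢
    omega
  rw [hrange, List.map_map]
  congr 1
  apply List.map_congr_left
  intro k hk
  have hk' := List.mem_range'_1.mp hk
  simp only [Function.comp]
  rw [seg_take t i j k (by omega), seg_drop t i j k]
  rw [hinv i (i + k) (by omega) (by omega) (by omega),
      hinv (i + k) j (by omega) (by omega) (by omega)]

theorem inner_inv (t : List String) (L : Nat) (dp : PySem.Dict (Nat × Nat) (List String))
    (hL : 1 ≤ L) (hLn : L + 1 ≤ t.length) (hinv : pvInv t L dp) :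
    pvInv t (L + 1) (pvInner t dp (L + 1)) := by
  -- strengthened fold invariant over the inner loop
  have main : ∀ (m : Nat), m ≤ t.length - (L + 1) + 1 →
      pvInv t L ((List.range m).foldl (fun dp i => dp.insert (i, i + (L+1)) (pvCell dp i (i + (L+1)))) dp)
      ∧ ∀ i' : Nat, i' < m →
        ((List.range m).foldl (fun dp i => dp.insert (i, i + (L+1)) (pvCell dp i (i + (L+1)))) dp).getD (i', i' + (L+1)) []
          = add_join_order_brackets (pvSeg t i' (i' + (L+1))) := by
    intro m
    induction m with
    | zero => intro _; exact ⟨hinv, by omega⟩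
    | succ m ih =>
        intro hm
        obtain ⟨ih1, ih2⟩ := ih (by omega)
        rw [List.range_succ, List.foldl_append]
        simp only [List.foldl_cons, List.foldl_nil]
        set dpm := (List.range m).foldl (fun dp i => dp.insert (i, i + (L+1)) (pvCell dp i (i + (L+1)))) dp with hdpm
        have hcell : pvCell dpm m (m + (L+1)) = add_join_order_brackets (pvSeg t m (m + (L+1))) :=
          cell_eq t L dpm ih1 m (m + (L+1)) (by omega) (by omega) (by omega) hL
        constructor
        · intro i j hij hj hspan
          rw [PySem.Dict.getD_insert, if_neg (by
            intro hcontra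
            have h1 : i = m := congrArg Prod.fst hcontra
            have h2 : j = m + (L+1) := congrArg Prod.snd hcontra
            omega)]
          exact ih1 i j hij hj hspan
        · intro i' hi'
          rw [PySem.Dict.getD_insert]
          by_cases hi : i' = m
          · subst hi
            rw [if_pos rfl, hcell]
          · rw [if_neg (by simp [hi])]
            exact ih2 i' (by omega)
  have := (main (t.length - (L+1) + 1) (by omega))
  intro i j hij hj hspan
  by_cases hsp : j - i ≤ L
  · exact this.1 i j hij hj hsp
  · have hji : j = i + (L + 1) := by omega
    subst hji
    exact this.2 i (by omega)

theorem main_inv (t : List String) : ∀ (m L : Nat) (dp : PySem.Dict (Nat × Nat) (List String)),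
    1 ≤ L → L + m ≤ t.length → pvInv t L dp →
    pvInv t (L + m) ((List.range' (L + 1) m).foldl (pvInner t) dp) := by
  intro m
  induction m with
  | zero => intro L dp _ _ h; simpa using h
  | succ m ih =>
      intro L dp hL hLm hinv
      rw [List.range'_succ, List.foldl_cons]
      have step := inner_inv t L dp hL (by omega) hinv
      have := ih (L + 1) (pvInner t dp (L + 1)) (by omega) (by omega) step
      rw [show L + (m + 1) = L + 1 + m by omega]
      exact this

theorem ab_eq (t : List String) : add_join_order_brackets t = add_join_order_brackets_alt t := by
  rw [alt_eq]
  by_cases h0 : t.length = 0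
  · rw [if_pos h0]
    rw [List.length_eq_zero_iff.mp h0]
    rw [add_join_order_brackets]
    simp
  · rw [if_neg h0]
    by_cases h1 : t.length = 1
    · -- lengths loop is empty; the base dict already answers (0, 1)
      have hr : List.range' 2 (t.length - 1) = [] := by simp [h1]
      rw [hr, List.foldl_nil, h1]
      rw [base_inv t 0 1 (by omega) (by omega) (by omega)]
      congr 1
      have : pvSeg t 0 1 = t := by
        simp only [pvSeg, Nat.sub_zero, List.drop_zero]
        exact List.take_of_length_le (by omega)
      rw [this]
    · have hn : 2 ≤ t.length := by omega
      have hfin := main_inv t (t.length - 1) 1 (pvBase t) (by omega) (by omega) (base_inv t)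
      simp only [show (1 : Nat) + 1 = 2 from rfl] at hfin
      have hfin2 := hfin 0 t.length (by omega) (by omega) (by omega)
      rw [hfin2]
      congr 1
      simp [pvSeg]

-- ===== VERDICT (by name: the statement is the Claim_ definition above) =====
theorem add_join_order_brackets_spec : Claim_equal_add_join_order_brackets := by
  intro tables _
  unfold Spec_add_join_order_brackets
  exact ab_eq tables
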